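-- pv_equiv track=rewrite | github.com/yu-0811/competitive-programming-library | algorithm_library/python/graph/SCC.py | _toCSR
-- ===== SOURCE A (Python) =====
-- def _toCSR(N: int, graphEdges: list[list]):
--   start = [0]*(N+1)
--   # endList := 辺を始点の昇順にソートした時の終点のリスト
--   endList = [0]*len(graphEdges)
--
--   # start[i+1] := 頂点 i を始点とする辺の数 となるように構築
--   for u,v in graphEdges: # u -> v への辺
--     start[u+1] += 1
--   # start[i] := 始点の頂点番号が i 未満である辺の数 になるように累積和を取る
--   # このとき、start[i] = endList で頂点 i が始点となる最小の index (0-index)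
--   for i in range(1,N+1):
--     start[i] += start[i-1]
--
--   # pointer[i] := 始点を i とする辺の endList への挿入位置
--   pointer = start[:]
--   for u,v in graphEdges:
--     endList[pointer[u]] = v
--     pointer[u] += 1
--
--   return start, endList
-- ===== SOURCE B (Python) =====
-- def _toCSR(N: int, graphEdges: list[list]):
--   # Bucket edges per source vertex, then prefix-sum the bucket lengths and flatten.
--   adj = [[] for _ in range(N)]
--   for u, v in graphEdges:
--     adj[u].append(v)
--   start = [0]
--   for bucket in adj:
--     start.append(start[-1] + len(bucket))
--   endList = [v for bucket in adj for v in bucket]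
--   return start, endList
-- ===== Notes on version B (the rewrite author's own statement) =====
-- stated objective: simpler
-- what changed: Replaces the counting array + running insertion-pointer pass (three loops mutating flat arrays) with per-vertex buckets built in one pass, a prefix sum of bucket lengths, and a flatten.
-- outside the precondition, e.g. on _toCSR(4, [[-2, -2]]): A returns ([0, 0, 0, 0, 1], [-2]), B returns ([0, 0, 0, 1, 1], [-2]); on _toCSR(-1, []): A returns ([], []), B returns ([0], [])
import Mathlib
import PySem

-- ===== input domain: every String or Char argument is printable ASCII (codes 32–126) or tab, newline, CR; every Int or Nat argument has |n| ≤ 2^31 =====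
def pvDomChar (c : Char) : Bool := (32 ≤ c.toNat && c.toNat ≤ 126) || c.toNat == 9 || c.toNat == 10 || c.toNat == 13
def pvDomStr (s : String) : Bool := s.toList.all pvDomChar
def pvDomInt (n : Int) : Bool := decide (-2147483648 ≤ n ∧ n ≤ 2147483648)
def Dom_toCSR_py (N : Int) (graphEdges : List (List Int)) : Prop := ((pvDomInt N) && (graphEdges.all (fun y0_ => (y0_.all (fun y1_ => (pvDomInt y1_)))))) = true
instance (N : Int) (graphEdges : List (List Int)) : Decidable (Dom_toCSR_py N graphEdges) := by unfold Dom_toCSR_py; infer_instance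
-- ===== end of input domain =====

-- B replaces A's counting-array + running-pointer fill with per-vertex buckets, a prefix sum of their lengths, and a flatten (objective: simpler).

-- ===== PORT A =====
-- loop bodies of A, named so the proofs can refer to them
def pvA_count (st : List Int) (e : List Int) : List Int :=
  match e with
  | [u, _v] => PySem.List.pySetD st (u + 1) (PySem.List.pyGetD st (u + 1) 0 + 1)
  | _ => st
def pvA_prefix (st : List Int) (i : Int) : List Int :=
  PySem.List.pySetD st i (PySem.List.pyGetD st i 0 + PySem.List.pyGetD st (i - 1) 0)
def pvA_fill (s : List Int × List Int) (e : List Int) : List Int × List Int :=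
  match e with
  | [u, v] =>
    let p := PySem.List.pyGetD s.2 u 0
    (PySem.List.pySetD s.1 p v, PySem.List.pySetD s.2 u (p + 1))
  | _ => s

def toCSR_py (N : Int) (graphEdges : List (List Int)) : List Int × List Int :=
  -- start = [0]*(N+1) ; endList = [0]*len(graphEdges)
  let start0 : List Int := List.replicate (N + 1).toNat 0
  let endList0 : List Int := List.replicate graphEdges.length 0
  -- for u,v in graphEdges: start[u+1] += 1
  -- (unpacking a non-pair raises ValueError and an out-of-range index raises IndexError in Python: excluded by Pre_)
  let start1 := graphEdges.foldl pvA_count start0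
  -- for i in range(1, N+1): start[i] += start[i-1]
  let start2 := (PySem.List.pyRange 1 (N + 1) 1).foldl pvA_prefix start1
  -- pointer = start[:] ; for u,v in graphEdges: endList[pointer[u]] = v ; pointer[u] += 1
  let fin := graphEdges.foldl pvA_fill (endList0, start2)
  (start2, fin.1)

-- ===== PORT B =====
-- loop bodies of B, named so the proofs can refer to them
def pvB_adj (a : List (List Int)) (e : List Int) : List (List Int) :=
  match e with
  | [u, v] => PySem.List.pySetD a u (PySem.List.pyGetD a u [] ++ [v])
  | _ => a
def pvB_scan (st : List Int) (b : List Int) : List Int :=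
  st ++ [PySem.List.pyGetD st (-1) 0 + (b.length : Int)]

def toCSR_py_alt (N : Int) (graphEdges : List (List Int)) : List Int × List Int :=
  -- adj = [[] for _ in range(N)] ; for u,v in graphEdges: adj[u].append(v)
  let adj0 : List (List Int) := List.replicate N.toNat []
  let adj := graphEdges.foldl pvB_adj adj0
  -- start = [0] ; for bucket in adj: start.append(start[-1] + len(bucket))
  let start := adj.foldl pvB_scan [0]
  -- endList = [v for bucket in adj for v in bucket]
  (start, adj.flatMap (fun b => b))

-- ===== PRECONDITION & SPEC =====
-- Pre_ excludes inputs where Python A raises (an edge that is not a 2-list: ValueError; a source u with u ≥ N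
-- or u+1 < -(N+1): IndexError) together with the accidental corners where A still returns: a negative source u,
-- where A's value comes from Python's negative-index wraparound (an artefact, and B wraps differently), and
-- N < 0 with no edges, where A's start [0]*(N+1) is accidentally empty.
def Pre_toCSR_py (N : Int) (graphEdges : List (List Int)) : Prop :=
  0 ≤ N ∧ ∀ e ∈ graphEdges, e.length = 2 ∧ 0 ≤ e.headI ∧ e.headI < N
instance (N : Int) (graphEdges : List (List Int)) : Decidable (Pre_toCSR_py N graphEdges) := by unfold Pre_toCSR_py; infer_instance
def pvWitness_toCSR_py : Int × List (List Int) := (3, [[0, 5], [2, 3], [0, -2], [1, 7]])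
def Spec_toCSR_py (N : Int) (graphEdges : List (List Int)) (out : List Int × List Int) : Prop := out = toCSR_py_alt N graphEdges
instance (N : Int) (graphEdges : List (List Int)) (out : List Int × List Int) : Decidable (Spec_toCSR_py N graphEdges out) := by unfold Spec_toCSR_py; infer_instance

-- ===== CLAIM (what is proved, stated in full; the proofs are below) =====
def Claim_equal_toCSR_py : Prop := ∀ (N : Int) (graphEdges : List (List Int)), Dom_toCSR_py N graphEdges → Pre_toCSR_py N graphEdges → Spec_toCSR_py N graphEdges (toCSR_py N graphEdges)

-- ===== LEMMAS AND PROOFS =====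

-- the per-source bucket of edge targets, in edge order
def pvBucket (es : List (List Int)) (i : Nat) : List Int :=
  es.filterMap (fun e => match e with
    | [u, v] => if u = (i : Int) then some v else none
    | _ => none)

-- running prefix-sum list produced by B's start loop
def pvScan (a : Int) : List (List Int) → List Int
  | [] => []
  | b :: bs => (a + (b.length : Int)) :: pvScan (a + (b.length : Int)) bs

-- number of edges of es whose source is < k (as Int)
def pvOffI (es : List (List Int)) (k : Nat) : Int :=
  ((List.range k).map (fun i => ((pvBucket es i).length : Int))).sum

-- contribution of A's counting loop at position j
def pvCnt1 (es : List (List Int)) : Nat → Int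
  | 0 => 0
  | j+1 => ((pvBucket es j).length : Int)

-- partial prefix sums of st (A's second loop after processing indices 1..m)
def pvSum (st : List Int) (j : Nat) : Int :=
  ((List.range (j+1)).map (fun t => st.getD t 0)).sum

-- CSR fill-state abstraction: segment of vertex i given already-placed buckets pb and capacities c
def pvSeg (c : Nat → Nat) (pb : Nat → List Int) (i : Nat) : List Int :=
  pb i ++ List.replicate (c i - (pb i).length) 0
def pvE (n : Nat) (c : Nat → Nat) (pb : Nat → List Int) : List Int :=
  (List.range n).flatMap (pvSeg c pb)
def pvOffC (c : Nat → Nat) (k : Nat) : Nat := ((List.range k).map c).sum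
def pvP (n : Nat) (c : Nat → Nat) (pb : Nat → List Int) : List Int :=
  (List.range n).map (fun k => ((pvOffC c k : Int) + ((pb k).length : Int))) ++ [(pvOffC c n : Int)]

lemma pvBucket_cons_pair (u v : Int) (es : List (List Int)) (i : Nat) :
    pvBucket ([u, v] :: es) i = if u = (i : Int) then v :: pvBucket es i else pvBucket es i := by
  by_cases h : u = (i : Int) <;> simp [pvBucket, h]

lemma shape_elim (N : Int) (es : List (List Int))
    (h : ∀ e ∈ es, e.length = 2 ∧ 0 ≤ e.headI ∧ e.headI < N) :
    ∀ e ∈ es, ∃ (k : Nat) (v : Int), e = [(k : Int), v] ∧ k < N.toNat := by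
  intro e he
  obtain ⟨hl, h0, hN⟩ := h e he
  match e, hl with
  | [u, v], _ =>
    simp only [List.headI] at h0 hN
    exact ⟨u.toNat, v, by simp [Int.toNat_of_nonneg h0], by omega⟩

-- B's bucket-building loop, characterised
lemma adj_fold (es : List (List Int)) (n : Nat)
    (hs : ∀ e ∈ es, ∃ (k : Nat) (v : Int), e = [(k : Int), v] ∧ k < n) :
    ∀ (a : List (List Int)), a.length = n →
    es.foldl pvB_adj a = a.mapIdx (fun i b => b ++ pvBucket es i) := by
  induction es with
  | nil =>
    intro a _
    refine (List.ext_getElem (by simp) ?_).symm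
    intro i h1 h2
    simp [pvBucket]
  | cons e es ih =>
    intro a ha
    obtain ⟨k, v, rfl, hk⟩ := hs e (by simp)
    rw [List.foldl_cons]
    show es.foldl _ (PySem.List.pySetD a (k : Int) (PySem.List.pyGetD a (k : Int) [] ++ [v])) = _
    rw [PySem.List.pySetD_natCast, PySem.List.pyGetD_natCast,
      ih (fun e he => hs e (by simp [he])) _ (by simp [ha])]
    apply List.ext_getElem (by simp)
    intro i h1 h2
    simp only [List.getElem_mapIdx, List.getElem_set, pvBucket_cons_pair]
    by_cases hik : i = k
    · subst hik
      have h1 : i < a.length := by simp at h2; omega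
      simp [List.getElem?_eq_getElem h1]
    · have h3 : ¬ (k : Int) = (i : Int) := fun h => hik (by exact_mod_cast h.symm)
      have h5 : ¬ k = i := fun h => hik h.symm
      simp [h3, h5]

-- B's start loop, characterised as pvScan
lemma scan_fold (bs : List (List Int)) :
    ∀ (xs : List Int) (a : Int),
    bs.foldl pvB_scan (xs ++ [a]) = xs ++ a :: pvScan a bs := by
  induction bs with
  | nil => intro xs a; simp [pvScan]
  | cons b bs ih =>
    intro xs a
    rw [List.foldl_cons]
    show bs.foldl pvB_scan ((xs ++ [a]) ++ [PySem.List.pyGetD (xs ++ [a]) (-1) 0 + (b.length : Int)]) = _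
    rw [PySem.List.pyGetD_neg_one_append_singleton, ih (xs ++ [a]) (a + (b.length : Int))]
    simp [pvScan]

lemma pvScan_append (ys zs : List (List Int)) :
    ∀ a : Int, pvScan a (ys ++ zs)
      = pvScan a ys ++ pvScan (a + ((ys.map (fun b => (b.length : Int))).sum)) zs := by
  induction ys with
  | nil => intro a; simp [pvScan]
  | cons y ys ih =>
    intro a
    simp only [List.cons_append, pvScan, ih (a + (y.length : Int)), List.map_cons, List.sum_cons]
    rw [add_assoc]

lemma scan_range (f : Nat → List Int) :
    ∀ n : Nat, (0 : Int) :: pvScan 0 ((List.range n).map f)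
      = (List.range (n+1)).map (fun k => ((List.range k).map (fun i => ((f i).length : Int))).sum) := by
  intro n
  induction n with
  | zero => simp [pvScan]
  | succ n ih =>
    rw [List.range_succ, List.map_append, pvScan_append,
      List.range_succ (n := n+1), List.map_append, ← ih]
    simp [pvScan, List.map_map, List.range_succ, Function.comp_def]

-- A's counting loop, characterised
lemma count_fold (es : List (List Int)) (n : Nat)
    (hs : ∀ e ∈ es, ∃ (k : Nat) (v : Int), e = [(k : Int), v] ∧ k < n) :
    ∀ (st : List Int), st.length = n + 1 →
    es.foldl pvA_count st = st.mapIdx (fun j x => x + pvCnt1 es j) := by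
  induction es with
  | nil =>
    intro st _
    refine (List.ext_getElem (by simp) ?_).symm
    intro j h1 h2
    cases j <;> simp [pvCnt1, pvBucket]
  | cons e es ih =>
    intro st hst
    obtain ⟨k, v, rfl, hk⟩ := hs e (by simp)
    rw [List.foldl_cons]
    show es.foldl pvA_count
      (PySem.List.pySetD st ((k : Int) + 1) (PySem.List.pyGetD st ((k : Int) + 1) 0 + 1)) = _
    have hc : ((k : Int) + 1) = ((k + 1 : Nat) : Int) := by push_cast; ring
    rw [hc, PySem.List.pySetD_natCast, PySem.List.pyGetD_natCast,
      ih (fun e he => hs e (by simp [he])) _ (by simp [hst])]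
    apply List.ext_getElem (by simp)
    intro j h1 h2
    simp only [List.getElem_mapIdx, List.getElem_set]
    by_cases hjk : j = k + 1
    · subst hjk
      have hl : k + 1 < st.length := by omega
      simp [List.getElem?_eq_getElem hl, pvCnt1, pvBucket_cons_pair]
      ring
    · rw [if_neg (fun h => hjk h.symm)]
      cases j with
      | zero => simp [pvCnt1]
      | succ t =>
        have htk : t ≠ k := fun h => hjk (by omega)
        have h3 : ¬ (k : Int) = (t : Int) := fun h => htk (by exact_mod_cast h.symm)
        simp [pvCnt1, pvBucket_cons_pair, h3]

-- A's prefix-sum loop, characterised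
lemma prefix_fold (st : List Int) :
    ∀ m : Nat, m < st.length →
    (PySem.List.pyRange 1 ((m : Int) + 1) 1).foldl pvA_prefix st
      = st.mapIdx (fun j x => if j ≤ m then pvSum st j else x) := by
  intro m
  induction m with
  | zero =>
    intro h0
    rw [show ((0 : Nat) : Int) + 1 = 1 by norm_num, PySem.List.pyRange_one_eq_nil (le_refl 1)]
    refine (List.ext_getElem (by simp) ?_).symm
    intro j h1 h2
    rcases Nat.eq_zero_or_pos j with rfl | hj
    · simp [pvSum, List.getElem?_eq_getElem (show 0 < st.length by omega)]
    · simp [Nat.pos_iff_ne_zero.mp hj]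
  | succ m ih =>
    intro hm1
    have hm : m < st.length := by omega
    rw [show (((m + 1 : Nat) : Int) + 1) = ((m : Int) + 1) + 1 by omega,
      PySem.List.pyRange_one_succ_right (by omega), List.foldl_append, ih hm,
      List.foldl_cons, List.foldl_nil]
    show PySem.List.pySetD _ ((m : Int) + 1)
      (PySem.List.pyGetD _ ((m : Int) + 1) 0 + PySem.List.pyGetD _ (((m : Int) + 1) - 1) 0) = _
    have hc : ((m : Int) + 1) = ((m + 1 : Nat) : Int) := by push_cast; ring
    have hc2 : (((m : Int) + 1) - 1) = ((m : Nat) : Int) := by ring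
    rw [hc2, hc, PySem.List.pySetD_natCast, PySem.List.pyGetD_natCast, PySem.List.pyGetD_natCast]
    have hg1 : (st.mapIdx (fun j x => if j ≤ m then pvSum st j else x)).getD (m+1) 0 = st[m+1]'(by omega) := by
      rw [List.getD_eq_getElem _ 0 (by simp; omega)]
      simp [List.getElem_mapIdx]
    have hg2 : (st.mapIdx (fun j x => if j ≤ m then pvSum st j else x)).getD m 0 = pvSum st m := by
      rw [List.getD_eq_getElem _ 0 (by simp; omega)]
      simp [List.getElem_mapIdx]
    rw [hg1, hg2]
    apply List.ext_getElem (by simp)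
    intro j h1 h2
    simp only [List.getElem_set, List.getElem_mapIdx]
    by_cases hj : j = m + 1
    · subst hj
      rw [if_pos rfl, if_pos (le_refl _)]
      have : pvSum st (m+1) = pvSum st m + st[m+1]'(by omega) := by
        simp [pvSum, List.range_succ, List.getElem?_eq_getElem (show m+1 < st.length by omega)]
        ring
      rw [this]
      ring
    · rw [if_neg (fun h => hj h.symm)]
      by_cases hjm : j ≤ m
      · rw [if_pos hjm, if_pos (by omega)]
      · rw [if_neg hjm, if_neg (by omega)]

lemma cnt1_sum (es : List (List Int)) :
    ∀ j : Nat, ((List.range (j+1)).map (pvCnt1 es)).sum = pvOffI es j := by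
  intro j
  induction j with
  | zero => simp [pvCnt1, pvOffI]
  | succ j ih =>
    rw [List.range_succ, List.map_append, List.sum_append, ih]
    simp [pvCnt1, pvOffI, List.range_succ]

lemma pvSum_delta (n k : Nat) (h : k < n) :
    ((List.range n).map (fun i => if i = k then 1 else 0)).sum = 1 := by
  induction n with
  | zero => omega
  | succ n ih =>
    rw [List.range_succ, List.map_append, List.sum_append]
    by_cases hkn : k = n
    · subst hkn
      have : ((List.range k).map (fun i => if i = k then 1 else 0)).sum = 0 := by
        refine List.sum_eq_zero ?_
        intro x hx
        obtain ⟨i, hi, rfl⟩ := List.mem_map.mp hx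
        simp [show i ≠ k from by simp at hi; omega]
      simp [this]
    · rw [ih (by omega)]
      simp [show n ≠ k from fun h => hkn h.symm]

lemma bucket_sum (es : List (List Int)) (n : Nat)
    (hs : ∀ e ∈ es, ∃ (k : Nat) (v : Int), e = [(k : Int), v] ∧ k < n) :
    ((List.range n).map (fun i => (pvBucket es i).length)).sum = es.length := by
  induction es with
  | nil =>
    refine List.sum_eq_zero ?_
    intro x hx
    obtain ⟨i, _, rfl⟩ := List.mem_map.mp hx
    simp [pvBucket]
  | cons e es ih =>
    obtain ⟨k, v, rfl, hk⟩ := hs e (by simp)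
    have ihe := ih (fun e he => hs e (by simp [he]))
    have hlen : ∀ i : Nat,
        (pvBucket ([(k : Int), v] :: es) i).length
          = (pvBucket es i).length + (if i = k then 1 else 0) := by
      intro i
      by_cases h : i = k
      · subst h; simp [pvBucket_cons_pair]
      · have h3 : ¬ (k : Int) = (i : Int) := fun hh => h (by exact_mod_cast hh.symm)
        simp [pvBucket_cons_pair, h3, h]
    simp only [hlen]
    rw [List.sum_map_add, ihe, pvSum_delta n k hk]
    simp

lemma flatMap_replicate (c : Nat → Nat) (l : List Nat) :
    l.flatMap (fun i => List.replicate (c i) (0 : Int)) = List.replicate ((l.map c).sum) 0 := by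
  induction l with
  | nil => simp
  | cons x l ih =>
    simp only [List.flatMap_cons, ih, List.map_cons, List.sum_cons, List.replicate_add]

lemma pv_flatMap_congr {α β : Type} (l : List α) (f g : α → List β)
    (h : ∀ a ∈ l, f a = g a) : l.flatMap f = l.flatMap g := by
  induction l with
  | nil => rfl
  | cons x l ih =>
    simp only [List.flatMap_cons, h x (by simp), ih (fun a ha => h a (by simp [ha]))]

-- A's fill loop, characterised (the counting-sort invariant)
lemma fill_fold (n : Nat) (c : Nat → Nat) :
    ∀ (es : List (List Int)) (pb : Nat → List Int),
    (∀ e ∈ es, ∃ (k : Nat) (v : Int), e = [(k : Int), v] ∧ k < n) →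
    (∀ i, i < n → (pb i).length + (pvBucket es i).length = c i) →
    es.foldl pvA_fill (pvE n c pb, pvP n c pb)
      = (pvE n c (fun i => pb i ++ pvBucket es i), pvP n c (fun i => pb i ++ pvBucket es i)) := by
  intro es
  induction es with
  | nil =>
    intro pb _ _
    have h0 : (fun i => pb i ++ pvBucket [] i) = pb := funext fun i => by simp [pvBucket]
    rw [List.foldl_nil, h0]
  | cons e es ih =>
    intro pb hs hlen
    obtain ⟨k, v, rfl, hk⟩ := hs e (by simp)
    have hck : (pb k).length + (v :: pvBucket es k).length = c k := by
      have h := hlen k hk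
      rwa [pvBucket_cons_pair, if_pos rfl] at h
    have hle : ∀ i, i < n → (pb i).length ≤ c i := fun i hi => by have := hlen i hi; omega
    have hr : (pb k).length < c k := by simp at hck; omega
    set pb2 : Nat → List Int := fun i => if i = k then pb k ++ [v] else pb i with hpb2
    have hsplit : List.range n = List.range k ++ k :: List.range' (k+1) (n-(k+1)) := by
      have h1 : List.range n = List.range' 0 (k + ((n - (k+1)) + 1)) := by
        rw [List.range_eq_range']; congr 1; omega
      rw [h1, ← List.range'_append_1 (s := 0) (m := k) (n := (n-(k+1)) + 1)]
      congr 1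
      · exact (List.range_eq_range' (n := k)).symm
      · rw [Nat.zero_add, List.range'_succ]
    set A := (List.range k).flatMap (pvSeg c pb) with hA
    set B := (List.range' (k+1) (n-(k+1))).flatMap (pvSeg c pb) with hB
    have hE : pvE n c pb = A ++ (pvSeg c pb k ++ B) := by
      rw [pvE, hsplit, List.flatMap_append, List.flatMap_cons]
    have hlenA : A.length = pvOffC c k := by
      rw [hA, List.length_flatMap, pvOffC]
      congr 1
      apply List.map_congr_left
      intro i hi
      have hi' : i < k := List.mem_range.mp hi
      have := hle i (by omega)
      simp [pvSeg]
      omega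
    have hsegk : (pvSeg c pb k).length = c k := by simp [pvSeg]; omega
    have hplen : (pvP n c pb).length = n + 1 := by simp [pvP]
    have hp : PySem.List.pyGetD (pvP n c pb) ((k : Nat) : Int) 0
        = (pvOffC c k : Int) + ((pb k).length : Int) := by
      rw [PySem.List.pyGetD_natCast, List.getD_eq_getElem _ 0 (by omega)]
      unfold pvP
      rw [List.getElem_append_left (by simpa using hk)]
      simp
    rw [List.foldl_cons]
    show es.foldl pvA_fill
      (PySem.List.pySetD (pvE n c pb) (PySem.List.pyGetD (pvP n c pb) ((k : Nat) : Int) 0) v,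
       PySem.List.pySetD (pvP n c pb) ((k : Nat) : Int)
         (PySem.List.pyGetD (pvP n c pb) ((k : Nat) : Int) 0 + 1)) = _
    rw [hp]
    have hEnew : PySem.List.pySetD (pvE n c pb) ((pvOffC c k : Int) + ((pb k).length : Int)) v
        = pvE n c pb2 := by
      have hsd : PySem.List.pySetD (pvE n c pb) ((pvOffC c k : Int) + ((pb k).length : Int)) v
          = (pvE n c pb).set ((pvOffC c k : Int) + ((pb k).length : Int)).toNat v := by
        apply PySem.List.pySetD_of_nonneg
        omega
      rw [hsd]
      have hidx : ((pvOffC c k : Int) + ((pb k).length : Int)).toNat = A.length + (pb k).length := by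
        rw [hlenA]; omega
      rw [hidx, hE]
      have hstep1 : (A ++ (pvSeg c pb k ++ B)).set (A.length + (pb k).length) v
          = A ++ ((pvSeg c pb k ++ B).set ((pb k).length) v) := by
        simp
      have hstep2 : (pvSeg c pb k ++ B).set ((pb k).length) v
          = ((pb k ++ [v]) ++ List.replicate (c k - ((pb k).length + 1)) 0) ++ B := by
        rw [List.set_append_left _ _ (by omega)]
        congr 1
        calc (pvSeg c pb k).set ((pb k).length) v
            = (pb k ++ (0 : Int) :: List.replicate (c k - ((pb k).length + 1)) 0).set ((pb k).length + 0) v := by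
              rw [pvSeg, show c k - (pb k).length = (c k - ((pb k).length + 1)) + 1 from by omega,
                List.replicate_succ]
              simp
          _ = pb k ++ ((0 : Int) :: List.replicate (c k - ((pb k).length + 1)) 0).set 0 v := by
              simp
          _ = (pb k ++ [v]) ++ List.replicate (c k - ((pb k).length + 1)) 0 := by
              simp
      rw [hstep1, hstep2]
      have hE2 : pvE n c pb2 = A ++ (((pb k ++ [v]) ++ List.replicate (c k - ((pb k).length + 1)) 0) ++ B) := by
        rw [pvE, hsplit, List.flatMap_append, List.flatMap_cons]
        congr 1
        · apply pv_flatMap_congr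
          intro i hi
          have hi' : i < k := List.mem_range.mp hi
          simp [pvSeg, hpb2, show ¬ i = k from by omega]
        · congr 1
          · simp [pvSeg, hpb2]
          · apply pv_flatMap_congr
            intro i hi
            have hi' : k + 1 ≤ i := by
              have := List.mem_range'.mp hi
              omega
            simp [pvSeg, hpb2, show ¬ i = k from by omega]
      rw [hE2]
    have hPnew : PySem.List.pySetD (pvP n c pb) ((k : Nat) : Int)
        ((pvOffC c k : Int) + ((pb k).length : Int) + 1) = pvP n c pb2 := by
      unfold pvP
      rw [PySem.List.pySetD_natCast, List.set_append_left _ _ (by simpa using hk)]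
      congr 1
      apply List.ext_getElem (by simp)
      intro j h1 h2
      have hj : j < n := by simpa using h2
      simp only [List.getElem_set, List.getElem_map, List.getElem_range]
      by_cases hjk : j = k
      · subst hjk
        rw [if_pos rfl]
        simp [hpb2]
        ring
      · rw [if_neg (fun h => hjk h.symm)]
        simp [hpb2, hjk]
    rw [hEnew, hPnew]
    have hlen2 : ∀ i, i < n → (pb2 i).length + (pvBucket es i).length = c i := by
      intro i hi
      by_cases hik : i = k
      · subst hik
        simp only [hpb2, if_pos rfl]
        simp at hck ⊢
        omega
      · have h := hlen i hi
        have h3 : ¬ (k : Int) = (i : Int) := fun hh => hik (by exact_mod_cast hh.symm)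
        rw [pvBucket_cons_pair, if_neg h3] at h
        simpa [hpb2, hik] using h
    rw [ih pb2 (fun e he => hs e (by simp [he])) hlen2]
    have hfin : (fun i => pb2 i ++ pvBucket es i)
        = (fun i => pb i ++ pvBucket ([(k : Int), v] :: es) i) := by
      funext i
      by_cases hik : i = k
      · subst hik
        simp [hpb2, pvBucket_cons_pair]
      · have h3 : ¬ (k : Int) = (i : Int) := fun hh => hik (by exact_mod_cast hh.symm)
        simp [hpb2, hik, pvBucket_cons_pair, h3]
    rw [hfin]
-- normal forms of the individual loops, towards the common value
lemma start1_norm (es : List (List Int)) (n : Nat)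
    (hs : ∀ e ∈ es, ∃ (k : Nat) (v : Int), e = [(k : Int), v] ∧ k < n) :
    es.foldl pvA_count (List.replicate (n+1) 0) = (List.range (n+1)).map (pvCnt1 es) := by
  rw [count_fold es n hs _ (by simp)]
  apply List.ext_getElem (by simp)
  intro j h1 h2
  simp [List.getElem_mapIdx]

lemma start2_norm (es : List (List Int)) (n : Nat) :
    (PySem.List.pyRange 1 ((n : Int) + 1) 1).foldl pvA_prefix ((List.range (n+1)).map (pvCnt1 es))
      = (List.range (n+1)).map (fun k => pvOffI es k) := by
  rw [prefix_fold _ n (by simp)]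
  apply List.ext_getElem (by simp)
  intro j h1 h2
  have hj : j ≤ n := by simp at h2; omega
  simp only [List.getElem_mapIdx, List.getElem_map, List.getElem_range, if_pos hj]
  have hsum : pvSum ((List.range (n+1)).map (pvCnt1 es)) j
      = ((List.range (j+1)).map (pvCnt1 es)).sum := by
    unfold pvSum
    congr 1
    apply List.map_congr_left
    intro t ht
    have ht' : t < j + 1 := List.mem_range.mp ht
    rw [List.getD_eq_getElem _ 0 (by simp; omega)]
    simp [List.getElem_map]
  rw [hsum, cnt1_sum]

lemma pvOffI_cast (es : List (List Int)) (k : Nat) :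
    pvOffI es k = ((((List.range k).map (fun i => (pvBucket es i).length)).sum : Nat) : Int) := by
  unfold pvOffI
  push_cast [List.map_map]
  rfl

lemma endList0_norm (es : List (List Int)) (n : Nat)
    (hs : ∀ e ∈ es, ∃ (k : Nat) (v : Int), e = [(k : Int), v] ∧ k < n) :
    List.replicate es.length (0 : Int)
      = pvE n (fun i => (pvBucket es i).length) (fun _ => []) := by
  unfold pvE
  have hseg : ∀ i ∈ List.range n,
      pvSeg (fun i => (pvBucket es i).length) (fun _ => ([] : List Int)) i
        = List.replicate ((pvBucket es i).length) 0 := by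
    intro i _
    simp [pvSeg]
  rw [pv_flatMap_congr _ _ _ hseg, flatMap_replicate, bucket_sum es n hs]

lemma pointer0_norm (es : List (List Int)) (n : Nat) :
    (List.range (n+1)).map (fun k => pvOffI es k)
      = pvP n (fun i => (pvBucket es i).length) (fun _ => []) := by
  unfold pvP pvOffC
  rw [List.range_succ, List.map_append]
  congr 1
  · apply List.map_congr_left
    intro i _
    rw [pvOffI_cast]
    simp
  · simp [pvOffI_cast]

lemma fillE_norm (es : List (List Int)) (n : Nat) :
    pvE n (fun i => (pvBucket es i).length) (fun i => [] ++ pvBucket es i)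
      = (List.range n).flatMap (pvBucket es) := by
  unfold pvE
  apply pv_flatMap_congr
  intro i _
  simp [pvSeg]

lemma adj_norm (es : List (List Int)) (n : Nat)
    (hs : ∀ e ∈ es, ∃ (k : Nat) (v : Int), e = [(k : Int), v] ∧ k < n) :
    es.foldl pvB_adj (List.replicate n []) = (List.range n).map (pvBucket es) := by
  rw [adj_fold es n hs _ (by simp)]
  apply List.ext_getElem (by simp)
  intro j h1 h2
  simp [List.getElem_mapIdx]

lemma startB_norm (es : List (List Int)) (n : Nat) :
    ((List.range n).map (pvBucket es)).foldl pvB_scan [(0 : Int)]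
      = (List.range (n+1)).map (fun k => pvOffI es k) := by
  rw [show [(0 : Int)] = ([] : List Int) ++ [0] from rfl, scan_fold _ [] 0, List.nil_append,
    scan_range (pvBucket es) n]
  rfl

theorem toCSR_py_spec : Claim_equal_toCSR_py := by
  intro N es _hDom hPre
  obtain ⟨hN0, hsh⟩ := hPre
  unfold Spec_toCSR_py
  have hs := shape_elim N es hsh
  have hNn : N = (N.toNat : Int) := (Int.toNat_of_nonneg hN0).symm
  set n := N.toNat with hn
  unfold toCSR_py toCSR_py_alt
  rw [hNn]
  dsimp only
  rw [show ((n : Int) + 1).toNat = n + 1 from by omega,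
    show ((n : Int)).toNat = n from by omega,
    start1_norm es n hs, start2_norm es n,
    endList0_norm es n hs, pointer0_norm es n,
    fill_fold n (fun i => (pvBucket es i).length) es (fun _ => []) hs (by simp),
    adj_norm es n hs, startB_norm es n, ← pointer0_norm es n]
  simp only [fillE_norm es n, List.flatMap_map]
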